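-- pv_equiv track=rewrite | github.com/boygioykaskyriakos/outliers_platform | dictionaries/main/minimum_list.py | check_by_removing_last
-- ===== SOURCE A (Python) =====
-- def check_by_removing_last(lis, target, solutions):
--     temp_lis = lis.copy()
--     if sum(lis[1:]) >= target:
--         temp_lis.pop(0)
--         solutions.append(temp_lis)
--
--         return check_by_removing_last(temp_lis, target, solutions)
--     else:
--         return solutions
-- ===== SOURCE B (Python) =====
-- def check_by_removing_last(lis, target, solutions):
--     # One pass with a running suffix sum instead of recursion with a fresh sum() each level.
--     remaining = sum(lis)
--     i = 0
--     n = len(lis)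
--     while i < n:
--         remaining -= lis[i]
--         if remaining < target:
--             break
--         i += 1
--         solutions.append(lis[i:])
--     return solutions
-- ===== Notes on version B (the rewrite author's own statement) =====
-- stated objective: faster
-- what changed: Replaces the tail recursion that recomputes sum(lis[1:]) at every level with a single index loop maintaining a running suffix sum, so each step is O(1) instead of O(n).
import Mathlib
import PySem

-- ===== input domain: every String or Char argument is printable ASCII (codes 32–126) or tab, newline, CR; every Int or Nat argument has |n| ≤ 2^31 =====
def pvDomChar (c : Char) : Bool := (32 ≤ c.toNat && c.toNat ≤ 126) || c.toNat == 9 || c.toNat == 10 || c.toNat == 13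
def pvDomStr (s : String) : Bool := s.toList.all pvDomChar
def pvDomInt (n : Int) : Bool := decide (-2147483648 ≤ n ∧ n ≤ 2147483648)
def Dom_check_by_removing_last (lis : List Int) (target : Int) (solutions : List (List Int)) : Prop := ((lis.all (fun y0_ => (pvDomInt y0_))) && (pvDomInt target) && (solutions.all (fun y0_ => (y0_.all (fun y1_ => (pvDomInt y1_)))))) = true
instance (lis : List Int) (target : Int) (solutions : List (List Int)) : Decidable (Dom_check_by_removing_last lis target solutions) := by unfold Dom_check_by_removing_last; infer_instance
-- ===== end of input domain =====

-- B replaces A's tail recursion (which recomputes sum(lis[1:]) at every level) by one index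
-- loop with a running suffix sum. Both Pythons mutate `solutions` in place by appending;
-- the theorems below are about the return value.

-- ===== PORT A =====
-- lis[1:] on a list is List.drop 1 (exact); temp_lis.pop(0) on the empty list raises
-- IndexError in Python — that input is excluded by Pre_; the port returns solutions there.
def check_by_removing_last (lis : List Int) (target : Int) (solutions : List (List Int)) : List (List Int) :=
  if target ≤ (lis.drop 1).sum then
    match lis with
    | [] => solutions
    | _ :: rest => check_by_removing_last rest target (solutions ++ [rest])
  else solutions

-- ===== PORT B =====
-- the while loop of Source B: `remaining` is the running suffix sum, lis[i:] = List.drop i (exact)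
def cbrlLoop (lis : List Int) (target : Int) (solutions : List (List Int)) (remaining : Int) (i : Nat) : List (List Int) :=
  if h : i < lis.length then
    let remaining' := remaining - lis[i]
    if remaining' < target then solutions
    else cbrlLoop lis target (solutions ++ [lis.drop (i + 1)]) remaining' (i + 1)
  else solutions
termination_by lis.length - i

def check_by_removing_last_alt (lis : List Int) (target : Int) (solutions : List (List Int)) : List (List Int) :=
  cbrlLoop lis target solutions lis.sum 0

-- ===== PRECONDITION & SPEC =====
-- Pre_ excludes exactly the inputs on which Python A raises IndexError: those where
-- target ≤ 0 and every proper suffix of lis sums to at least target, so the recursion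
-- reaches the empty list and pops from it.
def Pre_check_by_removing_last (lis : List Int) (target : Int) (solutions : List (List Int)) : Prop :=
  0 < target ∨ ∃ j ∈ List.range lis.length, (lis.drop (j + 1)).sum < target
instance (lis : List Int) (target : Int) (solutions : List (List Int)) : Decidable (Pre_check_by_removing_last lis target solutions) := by unfold Pre_check_by_removing_last; infer_instance

def pvWitness_check_by_removing_last : List Int × Int × List (List Int) := ([3, 2, 1], 3, [])

def Spec_check_by_removing_last (lis : List Int) (target : Int) (solutions : List (List Int)) (out : List (List Int)) : Prop := out = check_by_removing_last_alt lis target solutions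
instance (lis : List Int) (target : Int) (solutions : List (List Int)) (out : List (List Int)) : Decidable (Spec_check_by_removing_last lis target solutions out) := by unfold Spec_check_by_removing_last; infer_instance

-- ===== CLAIM (what is proved, stated in full; the proofs are below) =====
def Claim_equal_check_by_removing_last : Prop := ∀ (lis : List Int) (target : Int) (solutions : List (List Int)), Dom_check_by_removing_last lis target solutions → Pre_check_by_removing_last lis target solutions → Spec_check_by_removing_last lis target solutions (check_by_removing_last lis target solutions)

-- ===== LEMMAS AND PROOFS =====

-- Main invariant: B's loop at position i with the correct running suffix sum computes
-- exactly what A computes on the suffix lis.drop i (no precondition needed: where Python A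
-- would raise, both ports return solutions).
theorem cbrlLoop_eq_check (k : Nat) :
    ∀ (lis : List Int) (target : Int) (sol : List (List Int)) (i : Nat),
      lis.length ≤ i + k →
      cbrlLoop lis target sol ((lis.drop i).sum) i = check_by_removing_last (lis.drop i) target sol := by
  induction k with
  | zero =>
      intro lis target sol i hle
      have hdrop : lis.drop i = [] := List.drop_eq_nil_of_le (by omega)
      rw [cbrlLoop, check_by_removing_last.eq_def]
      simp [hdrop, show ¬ i < lis.length by omega]
  | succ k ih =>
      intro lis target sol i hle
      by_cases h : i < lis.length
      · have hdrop : lis.drop i = lis[i] :: lis.drop (i + 1) := List.drop_eq_getElem_cons h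
        rw [cbrlLoop, check_by_removing_last.eq_def]
        simp only [dif_pos h, hdrop, List.drop_one, List.tail_cons]
        have hsum2 : (lis[i] :: List.drop (i + 1) lis).sum - lis[i] = (List.drop (i + 1) lis).sum := by
          rw [List.sum_cons]; ring
        rw [hsum2]
        by_cases hc : (lis.drop (i + 1)).sum < target
        · rw [if_pos hc, if_neg (show ¬ target ≤ (lis.drop (i + 1)).sum by omega)]
        · rw [if_neg hc, if_pos (show target ≤ (lis.drop (i + 1)).sum by omega)]
          exact ih lis target (sol ++ [lis.drop (i + 1)]) (i + 1) (by omega)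
      · have hdrop : lis.drop i = [] := List.drop_eq_nil_of_le (by omega)
        rw [cbrlLoop, check_by_removing_last.eq_def]
        simp [hdrop, h]

-- ===== VERDICT (by name: the statement is the Claim_ definition above) =====
theorem check_by_removing_last_spec : Claim_equal_check_by_removing_last := by
  intro lis target solutions _ _
  unfold Spec_check_by_removing_last check_by_removing_last_alt
  have := cbrlLoop_eq_check lis.length lis target solutions 0 (by omega)
  simpa using this.symm
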